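-- pv_equiv track=rewrite | github.com/kharybdys/adventOfCode2023 | puzzle11/solver.py | coordinates_to_corrections
-- ===== SOURCE A (Python) =====
-- from typing import Generator, Iterable, Self, Counter
--
-- def coordinates_to_corrections(coords: list[int], max_coord: int) -> dict[int, int]:
--     result: dict[int, int] = {}
--     counter = Counter(coords)
--     correction = 0
--     for i in range(0, max_coord):
--         result[i] = correction
--         if not counter.get(i):
--             correction += 1
--     return result
-- ===== SOURCE B (Python) =====
-- def coordinates_to_corrections(coords: list[int], max_coord: int) -> dict[int, int]:
--     # Build an emptiness indicator per position, then an exclusive prefix-sum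
--     # table, then read the table; result[i] = empty positions strictly before i.
--     present = set(coords)
--     indicators = [0 if i in present else 1 for i in range(max_coord)]
--     prefix = [0]
--     for x in indicators:
--         prefix.append(prefix[-1] + x)
--     return {i: prefix[i] for i in range(max_coord)}
-- ===== Notes on version B (the rewrite author's own statement) =====
-- stated objective: alternative
-- what changed: Replaces A's single loop threading a Counter lookup and a running correction through a dict with a three-stage decomposition: a set-membership indicator list, an explicit prefix-sum table, and a final dict comprehension indexing that table.
import Mathlib
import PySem

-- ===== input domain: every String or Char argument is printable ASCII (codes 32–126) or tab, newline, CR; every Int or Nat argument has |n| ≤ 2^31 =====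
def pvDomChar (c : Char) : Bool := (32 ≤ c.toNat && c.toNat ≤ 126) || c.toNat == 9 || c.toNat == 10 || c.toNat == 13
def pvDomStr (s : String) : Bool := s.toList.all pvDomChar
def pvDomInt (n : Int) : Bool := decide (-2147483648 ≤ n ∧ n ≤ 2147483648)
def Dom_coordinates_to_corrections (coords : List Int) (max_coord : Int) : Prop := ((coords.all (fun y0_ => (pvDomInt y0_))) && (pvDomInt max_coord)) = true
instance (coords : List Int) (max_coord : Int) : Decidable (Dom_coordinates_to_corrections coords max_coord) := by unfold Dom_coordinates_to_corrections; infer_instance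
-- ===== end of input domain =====

-- B replaces A's single accumulator-threading loop by an indicator-list + pref-sum-table + table-read decomposition; same cost, proved equal.


-- ===== PORT A =====
-- literal port: Counter(coords); one loop over range(0, max_coord) threading (result dict, correction);
-- 'not counter.get(i)' is '(counter.get? i).getD 0 = 0' (None and 0 are both falsy; Counter values are ints).
def coordinates_to_corrections (coords : List Int) (max_coord : Int) : List (Int × Int) :=
  let counter := PySem.Dict.counter coords
  let st := (PySem.List.pyRange 0 max_coord).foldl
    (fun (s : PySem.Dict Int Int × Int) i =>
      (s.1.insert i s.2, if (counter.get? i).getD 0 = 0 then s.2 + 1 else s.2))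
    (PySem.Dict.empty, 0)
  st.1.items

-- ===== PORT B =====
-- literal port of Source B: present set, indicator list, pref table (pref[-1] is pyGet? p (-1),
-- in range since the table starts at [0]; .getD 0 only discharges the never-none option), table read.
def coordinates_to_corrections_alt (coords : List Int) (max_coord : Int) : List (Int × Int) :=
  let present := PySem.Set.ofList coords
  let indicators := (PySem.List.pyRange 0 max_coord).map
    (fun i => if PySem.Set.contains present i then (0 : Int) else 1)
  let pref := indicators.foldl
    (fun p x => p ++ [(PySem.List.pyGet? p (-1)).getD 0 + x]) [(0 : Int)]
  (PySem.List.pyRange 0 max_coord).map (fun i => (i, (PySem.List.pyGet? pref i).getD 0))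

-- ===== PRECONDITION & SPEC =====
def Spec_coordinates_to_corrections (coords : List Int) (max_coord : Int) (out : List (Int × Int)) : Prop := out = coordinates_to_corrections_alt coords max_coord
instance (coords : List Int) (max_coord : Int) (out : List (Int × Int)) : Decidable (Spec_coordinates_to_corrections coords max_coord out) := by unfold Spec_coordinates_to_corrections; infer_instance

-- ===== CLAIM (what is proved, stated in full; the proofs are below) =====
def Claim_equal_coordinates_to_corrections : Prop := ∀ (coords : List Int) (max_coord : Int), Dom_coordinates_to_corrections coords max_coord → Spec_coordinates_to_corrections coords max_coord (coordinates_to_corrections coords max_coord)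

-- ===== LEMMAS AND PROOFS =====

-- number of positions in [0, k) that are absent from coords
def pvEmp (coords : List Int) (k : Nat) : Int :=
  ((List.range k).countP (fun j => decide ((j : Int) ∉ coords)) : Int)

theorem pvEmp_succ (coords : List Int) (n : Nat) :
    pvEmp coords (n + 1) =
      pvEmp coords n + (if (n : Int) ∈ coords then 0 else 1) := by
  by_cases h : (n : Int) ∈ coords <;>
    simp [pvEmp, List.range_succ, List.countP_append, h]

theorem pvRange_eq (m : Int) :
    PySem.List.pyRange 0 m = (List.range m.toNat).map (fun (k : Nat) => (k : Int)) := by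
  by_cases h : 0 ≤ m
  · rw [← Int.toNat_of_nonneg h, PySem.List.pyRange_zero_natCast, Int.toNat_natCast]
  · have h0 : m.toNat = 0 := Int.toNat_of_nonpos (by omega)
    rw [h0]
    simp [PySem.List.pyRange]
    omega

-- A-side loop invariant
theorem pvA_inv (coords : List Int) (n : Nat) :
    (((List.range n).map (fun (k : Nat) => (k : Int))).foldl
      (fun (s : PySem.Dict Int Int × Int) i =>
        (s.1.insert i s.2,
         if ((PySem.Dict.counter coords).get? i).getD 0 = 0 then s.2 + 1 else s.2))
      (PySem.Dict.empty, 0))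
    = (PySem.Dict.mk ((List.range n).map (fun (k : Nat) => ((k : Int), pvEmp coords k))),
       pvEmp coords n) := by
  induction n with
  | zero => rfl
  | succ n ih =>
    rw [List.range_succ, List.map_append, List.foldl_append, ih]
    simp only [List.map_cons, List.map_nil, List.foldl_cons, List.foldl_nil]
    have hcnt : ((PySem.Dict.counter coords).get? (n : Int)).getD 0
        = ((List.count (n : Int) coords : Nat) : Int) := by
      rw [← PySem.Dict.getD_eq_get?_getD, PySem.Dict.getD_counter]
    have hfresh : (PySem.Dict.mk ((List.range n).map
        (fun (k : Nat) => ((k : Int), pvEmp coords k)))).contains (n : Int) = false := by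
      rw [PySem.Dict.contains_eq_decide_mem_keys]
      simp only [PySem.Dict.keys, decide_eq_false_iff_not]
      intro hmem
      simp only [List.map_map, List.mem_map, Function.comp, List.mem_range] at hmem
      obtain ⟨k, hk, hkn⟩ := hmem
      omega
    refine Prod.ext ?_ ?_
    · -- items after the fresh-key insert
      show PySem.Dict.mk _ = _
      apply PySem.Dict.ext
      show (PySem.Dict.insert _ _ _).items = _
      rw [PySem.Dict.items_insert_of_not_contains _ _ hfresh]
      simp
    · -- the correction accumulator
      show (if _ then _ else _) = _
      rw [hcnt, pvEmp_succ]
      by_cases h : (n : Int) ∈ coords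
      · have hc : List.count ((n : Int)) coords ≠ 0 := by
          simpa [List.count_eq_zero] using h
        simp [h, hc]
      · have hc : List.count ((n : Int)) coords = 0 := by
          simpa [List.count_eq_zero] using h
        simp [h, hc]

theorem pvContains_eq (coords : List Int) (i : Int) :
    PySem.Set.contains (PySem.Set.ofList coords) i = decide (i ∈ coords) := by
  by_cases h : i ∈ coords
  · simp [PySem.Set.contains, h, (PySem.Set.mem_ofList coords i).2 h]
  · have hn : i ∉ PySem.Set.ofList coords := fun hm => h ((PySem.Set.mem_ofList coords i).1 hm)
    simp [PySem.Set.contains, h, hn]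

-- B-side pref-table invariant
theorem pvB_pref (coords : List Int) (n : Nat) :
    ((List.range n).map (fun (k : Nat) =>
        if PySem.Set.contains (PySem.Set.ofList coords) (k : Int) then (0 : Int) else 1)).foldl
      (fun p x => p ++ [(PySem.List.pyGet? p (-1)).getD 0 + x]) [(0 : Int)]
    = (List.range (n + 1)).map (fun k => pvEmp coords k) := by
  induction n with
  | zero => rfl
  | succ n ih =>
    rw [List.range_succ, List.map_append, List.foldl_append, ih]
    simp only [List.map_cons, List.map_nil, List.foldl_cons, List.foldl_nil]
    have hlen : ((List.range (n + 1)).map (fun k => pvEmp coords k)).length = n + 1 := by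
      simp
    have hlast : PySem.List.pyGet? ((List.range (n + 1)).map (fun k => pvEmp coords k)) (-1)
        = ((List.range (n + 1)).map (fun k => pvEmp coords k))[n]? := by
      simp [PySem.List.pyGet?, PySem.List.pyIdx?, hlen]
    rw [hlast]
    have hget : ((List.range (n + 1)).map (fun k => pvEmp coords k))[n]? = some (pvEmp coords n) := by
      simp
    rw [hget, List.range_succ (n := n + 1), List.map_append]
    congr 1
    simp only [List.map_cons, List.map_nil, Option.getD_some]
    rw [pvContains_eq, pvEmp_succ]
    by_cases h : (n : Int) ∈ coords <;> simp [h]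

-- ===== VERDICT (by name: the statement is the Claim_ definition above) =====
theorem coordinates_to_corrections_spec : Claim_equal_coordinates_to_corrections := by
  intro coords max_coord _
  unfold Spec_coordinates_to_corrections coordinates_to_corrections coordinates_to_corrections_alt
  dsimp only
  rw [pvRange_eq]
  set n := max_coord.toNat with hn
  rw [pvA_inv]
  simp only [List.map_map]
  have hcomp : ((fun i => if PySem.Set.contains (PySem.Set.ofList coords) i then (0 : Int) else 1)
      ∘ (fun (k : Nat) => (k : Int)))
      = (fun (k : Nat) =>
          if PySem.Set.contains (PySem.Set.ofList coords) (k : Int) then (0 : Int) else 1) := rfl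
  rw [hcomp, pvB_pref]
  apply List.ext_getElem
  · simp
  · intro i h1 h2
    simp only [List.getElem_map, List.getElem_range, Function.comp]
    have hi : i < n := by simpa using h2
    have hnat : PySem.List.pyGet? ((List.range (n + 1)).map (fun k => pvEmp coords k)) ((i : Nat) : Int)
        = ((List.range (n + 1)).map (fun k => pvEmp coords k))[i]? :=
      PySem.List.pyGet?_natCast _ i
    rw [hnat]
    simp [Nat.lt_succ_of_lt hi]
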